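-- pv_equiv track=rewrite | github.com/AdamZhouSE/pythonHomework | Code/CodeRecords/2185/60619/259518.py | find
-- ===== SOURCE A (Python) =====
-- def find(index):
--     if index == 1:
--         return "4"
--     elif index == 2:
--         return "7"
--     else:
--         count = get_count(index)
--         x = 2 ** count - 2
--         if index - x <= 2**(count-1):
--             return "4"+find(index - 2**(count-1))
--         else:
--             return "7"+find(index - 2*2**(count-1))
--
-- def get_count(target):
--     result = 1
--     while 2**(result+1) - 2 < target:
--         result += 1
--     return result
-- ===== SOURCE B (Python) =====
-- def find(index):
--     k = 1
--     while 2 ** (k + 1) - 2 < index: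
--         k += 1
--     offset = index - (2 ** k - 2) - 1
--     out = ""
--     for _ in range(k):
--         out = ("7" if offset % 2 else "4") + out
--         offset //= 2
--     return out
-- ===== Notes on version B (the rewrite author's own statement) =====
-- stated objective: simpler
-- what changed: Replaced the per-digit recursion (which recomputes get_count at every level and re-indexes into a smaller group) by a single closed-form pass: compute the digit count k once with one while loop, take the offset of index within the k-digit group, and expand that offset in binary, mapping each clear bit to a '4' and each set bit to a '7'.
-- outside the precondition, e.g. on find(0): A raises RecursionError, B returns '7'
import Mathlib
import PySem

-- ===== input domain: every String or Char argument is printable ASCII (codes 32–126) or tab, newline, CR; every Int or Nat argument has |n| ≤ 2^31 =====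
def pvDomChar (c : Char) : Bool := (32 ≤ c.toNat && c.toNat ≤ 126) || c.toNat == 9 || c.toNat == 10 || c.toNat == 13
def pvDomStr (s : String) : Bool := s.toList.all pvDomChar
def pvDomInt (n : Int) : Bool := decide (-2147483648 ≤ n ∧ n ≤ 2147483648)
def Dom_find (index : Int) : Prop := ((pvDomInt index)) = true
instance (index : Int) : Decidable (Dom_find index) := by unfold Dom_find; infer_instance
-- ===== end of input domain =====

-- B replaces A's per-digit recursion (with a fresh get_count pass each level) by one
-- group-size computation followed by a single binary-expansion loop: simpler, one pass.
-- A never returns on non-positive indices, which Pre_ excludes.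

-- ===== PORT A =====
-- get_count's while loop, ported with fuel; 64 iterations suffice for every |target| ≤ 2^31 (Dom).
-- result starts at 1 and only grows, so Nat is exact for Python's int here.
def getCountA : Nat → Nat → Int → Nat
  | 0, r, _ => r
  | f+1, r, t => if (2:Int) ^ (r + 1) - 2 < t then getCountA f (r + 1) t else r

def get_count (target : Int) : Nat := getCountA 64 1 target

-- find's recursion, ported with fuel; index.toNat + 1 levels suffice on Pre_,
-- since each recursive call strictly decreases a positive index.
def findAux : Nat → Int → String
  | 0, _ => ""          -- fuel exhausted: unreachable under Pre_
  | f+1, index =>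
    if index = 1 then "4"
    else if index = 2 then "7"
    else
      let count := get_count index
      let x : Int := 2 ^ count - 2
      if index - x ≤ (2:Int) ^ (count - 1) then
        "4" ++ findAux f (index - (2:Int) ^ (count - 1))
      else
        "7" ++ findAux f (index - 2 * (2:Int) ^ (count - 1))

def find (index : Int) : String := findAux (index.toNat + 1) index

-- ===== PORT B =====
-- B's own while loop computing the digit count k (fuel 64, enough on Dom).
def getK : Nat → Nat → Int → Nat
  | 0, k, _ => k
  | f+1, k, t => if (2:Int) ^ (k + 1) - 2 < t then getK f (k + 1) t else k

-- B's for-loop: k times prepend the low bit of offset ('0'→"4", '1'→"7") and halve offset.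
def bitsB : Nat → Int → String
  | 0, _ => ""
  | k+1, off => bitsB k (PySem.Int.floordiv off 2) ++ (if PySem.Int.mod off 2 ≠ 0 then "7" else "4")

def find_alt (index : Int) : String :=
  let k := getK 64 1 index
  let offset := index - ((2:Int) ^ k - 2) - 1
  bitsB k offset

-- ===== PRECONDITION & SPEC =====
-- Pre_ excludes non-positive indices, on which Python A never returns (unbounded recursion / RecursionError).
def Pre_find (index : Int) : Prop := 1 ≤ index
instance (index : Int) : Decidable (Pre_find index) := by unfold Pre_find; infer_instance
def pvWitness_find : Int := 5
def Spec_find (index : Int) (out : String) : Prop := out = find_alt index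
instance (index : Int) (out : String) : Decidable (Spec_find index out) := by unfold Spec_find; infer_instance

-- ===== CLAIM (what is proved, stated in full; the proofs are below) =====
def Claim_equal_find : Prop := ∀ (index : Int), Dom_find index → Pre_find index → Spec_find index (find index)

-- ===== LEMMAS AND PROOFS =====

theorem getCountA_eq (k : Nat) (idx : Int) (hk : 1 ≤ k)
    (h1 : (2:Int)^k - 2 < idx) (h2 : idx ≤ (2:Int)^(k+1) - 2) :
    ∀ f r, 1 ≤ r → r ≤ k → k - r ≤ f → getCountA f r idx = k := by
  intro f
  induction f with
  | zero =>
    intro r _ hrk hfr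
    have : r = k := by omega
    simp [getCountA, this]
  | succ f ih =>
    intro r hr1 hrk hfr
    by_cases hc : (2:Int) ^ (r + 1) - 2 < idx
    · have hrlt : r < k := by
        by_contra h
        have : r = k := by omega
        subst this
        omega
      simp only [getCountA, if_pos hc]
      exact ih (r+1) (by omega) (by omega) (by omega)
    · have hrk' : r = k := by
        by_contra h
        have hlt : r + 1 ≤ k := by omega
        have : (2:Int)^(r+1) ≤ (2:Int)^k := pow_le_pow_right₀ (by norm_num) hlt
        exact hc (by omega)
      subst hrk'
      simp only [getCountA]
      rw [if_neg hc]

theorem getK_eq_getCountA : ∀ f r t, getK f r t = getCountA f r t := by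
  intro f
  induction f with
  | zero => intro r t; rfl
  | succ f ih => intro r t; simp only [getK, getCountA]; split <;> simp [ih]

theorem bitsB_split (k : Nat) : ∀ off : Int, 0 ≤ off → off < (2:Int)^(k+1) →
    bitsB (k+1) off =
      (if off < (2:Int)^k then "4" ++ bitsB k off else "7" ++ bitsB k (off - (2:Int)^k)) := by
  induction k with
  | zero =>
    intro off h0 h2
    interval_cases off <;> decide
  | succ k ih =>
    intro off h0 h2
    have hP : (0:Int) < 2^k := by positivity
    have hd2 : PySem.Int.floordiv off 2 = off / 2 := PySem.Int.floordiv_eq_ediv_of_pos (by norm_num)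
    have hm2 : ∀ x : Int, PySem.Int.mod x 2 = x % 2 := fun x => PySem.Int.mod_eq_emod_of_pos (by norm_num)
    have hstep : bitsB (k+2) off = bitsB (k+1) (off / 2) ++ (if off % 2 ≠ 0 then "7" else "4") := by
      simp [bitsB]
    have hub : off / 2 < (2:Int)^(k+1) := by
      have : (2:Int)^(k+2) = 2 * 2^(k+1) := by ring
      omega
    rw [hstep, ih (off / 2) (by omega) hub]
    have h2k1 : (2:Int)^(k+1) = 2 * 2^k := by ring
    have h2k2 : (2:Int)^(k+2) = 2 * 2^(k+1) := by ring
    by_cases hc : off < (2:Int)^(k+1)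
    · have hc' : off / 2 < (2:Int)^k := by omega
      have hd2' : PySem.Int.floordiv off 2 = off / 2 := hd2
      rw [if_pos hc', if_pos hc]
      simp [bitsB, String.append_assoc]
    · have hc' : ¬ off / 2 < (2:Int)^k := by omega
      rw [if_neg hc', if_neg hc]
      have e1 : (off - (2:Int)^(k+1)) / 2 = off / 2 - 2^k := by omega
      have e2 : (off - (2:Int)^(k+1)) % 2 = off % 2 := by omega
      simp [bitsB, e1, e2, String.append_assoc]

theorem findAux_eq : ∀ k : Nat, 1 ≤ k → k ≤ 60 →
    ∀ f (idx : Int), k ≤ f → (2:Int)^k - 2 < idx → idx ≤ (2:Int)^(k+1) - 2 →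
    findAux f idx = bitsB k (idx - ((2:Int)^k - 2) - 1) := by
  intro k
  induction k with
  | zero => omega
  | succ k ih =>
    intro _ hk60 f idx hf h1 h2
    obtain ⟨f, rfl⟩ : ∃ f', f = f' + 1 := ⟨f - 1, by omega⟩
    by_cases hk0 : k = 0
    · subst hk0
      norm_num at h1 h2
      rcases (by omega : idx = 1 ∨ idx = 2) with rfl | rfl
      · have : findAux (f+1) 1 = "4" := by simp [findAux]
        rw [this]; decide
      · have : findAux (f+1) 2 = "7" := by simp [findAux]
        rw [this]; decide
    · have hk1 : 1 ≤ k := by omega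
      have h4 : (4:Int) ≤ 2^(k+1) := by
        calc (4:Int) = 2^2 := by norm_num
        _ ≤ 2^(k+1) := pow_le_pow_right₀ (by norm_num) (by omega)
      have hne1 : idx ≠ 1 := by omega
      have hne2 : idx ≠ 2 := by omega
      have hcount : get_count idx = k + 1 := by
        unfold get_count
        exact getCountA_eq (k+1) idx (by omega) h1 h2 64 1 (by omega) (by omega) (by omega)
      have h2k1 : (2:Int)^(k+1) = 2 * 2^k := by ring
      have hP : (0:Int) < 2^k := by positivity
      have hsplit := bitsB_split k (idx - ((2:Int)^(k+1) - 2) - 1) (by omega) (by omega)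
      simp only [findAux, if_neg hne1, if_neg hne2, hcount, Nat.add_sub_cancel]
      by_cases hc : idx - ((2:Int)^(k+1) - 2) ≤ (2:Int)^k
      · rw [if_pos hc]
        rw [ih hk1 (by omega) f (idx - (2:Int)^k) (by omega) (by omega) (by omega)]
        rw [hsplit, if_pos (by omega)]
        have he : idx - (2:Int)^k - ((2:Int)^k - 2) - 1 = idx - ((2:Int)^(k+1) - 2) - 1 := by
          rw [h2k1]; ring
        rw [he]
      · rw [if_neg hc]
        rw [ih hk1 (by omega) f (idx - 2 * (2:Int)^k) (by omega) (by omega) (by omega)]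
        rw [hsplit, if_neg (by omega)]
        have he : idx - 2 * (2:Int)^k - ((2:Int)^k - 2) - 1 = idx - ((2:Int)^(k+1) - 2) - 1 - (2:Int)^k := by
          rw [h2k1]; ring
        rw [he]

-- ===== VERDICT (by name: the statement is the Claim_ definition above) =====
theorem find_spec : Claim_equal_find := by
  intro index hdom hpre
  have hpre' : 1 ≤ index := hpre
  have hdom' : index ≤ 2147483648 := by
    unfold Dom_find pvDomInt at hdom
    simp at hdom
    omega
  set n : Nat := index.toNat with hn
  have hin : (n : Int) = index := Int.toNat_of_nonneg (by omega)
  set k : Nat := Nat.log2 (n + 1) with hkdef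
  have h2k : 2^k ≤ n + 1 := Nat.log2_self_le (by omega)
  have h2k' : n + 1 < 2^(k+1) := Nat.lt_log2_self
  have hk1 : 1 ≤ k := (Nat.le_log2 (by omega)).mpr (by omega)
  have hk60 : k ≤ 60 := by
    by_contra h
    have : 2^61 ≤ 2^k := Nat.pow_le_pow_right (by norm_num) (by omega)
    have hn31 : n ≤ 2147483648 := by omega
    omega
  have hcast : ((2^k : Nat) : Int) = (2:Int)^k := by push_cast; ring
  have hcast' : ((2^(k+1) : Nat) : Int) = (2:Int)^(k+1) := by push_cast; ring
  have hb1 : (2:Int)^k - 2 < index := by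
    have : ((2^k : Nat) : Int) ≤ (n:Int) + 1 := by exact_mod_cast h2k
    omega
  have hb2 : index ≤ (2:Int)^(k+1) - 2 := by
    have : ((n:Int)) + 1 < ((2^(k+1) : Nat) : Int) := by exact_mod_cast h2k'
    omega
  have hfuel : k ≤ n + 1 := by
    have : k < 2^k := Nat.lt_two_pow_self
    omega
  have hA : find index = bitsB k (index - ((2:Int)^k - 2) - 1) := by
    unfold find
    rw [← hn]
    exact findAux_eq k hk1 hk60 (n+1) index hfuel hb1 hb2
  have hB : find_alt index = bitsB k (index - ((2:Int)^k - 2) - 1) := by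
    unfold find_alt
    rw [getK_eq_getCountA]
    rw [show getCountA 64 1 index = k from getCountA_eq k index hk1 hb1 hb2 64 1 (by omega) hk1 (by omega)]
  unfold Spec_find
  rw [hA, hB]
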